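-- pv_equiv track=rewrite | github.com/DipperChen2007/Skibidi_Enhancer | S/21/21_s2.py | MA
-- ===== SOURCE A (Python) =====
-- def MA(grid, lst):
--     row_flip = [0] * len(grid)
--     col_flip = [0] * len(grid[0])
--
--     for l, n in lst:
--         if l == "R":
--             row_flip[n - 1] ^= 1
--         elif l == "C":
--             col_flip[n - 1] ^= 1
--
--     answer = 0
--     for i in range(len(grid)):
--         for j in range(len(grid[0])):
--             if (row_flip[i] ^ col_flip[j]) == 1:
--                 answer += 1
--     return answer
-- ===== SOURCE B (Python) =====
-- def MA(grid, lst):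
--     m, n = len(grid), len(grid[0])
--     row_flip = [0] * m
--     col_flip = [0] * n
--     for l, k in lst:
--         if l == "R":
--             row_flip[k - 1] ^= 1
--         elif l == "C":
--             col_flip[k - 1] ^= 1
--     R = sum(row_flip)
--     C = sum(col_flip)
--     return R * (n - C) + (m - R) * C
-- ===== Notes on version B (the rewrite author's own statement) =====
-- stated objective: faster
-- what changed: B replaces A's nested scan over all M*N cells with a closed form: after the same flip-toggling pass, a cell differs iff exactly one of its row/column is flipped, so the answer is R*(N-C)+(M-R)*C from the flip counts alone.
import Mathlib
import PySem

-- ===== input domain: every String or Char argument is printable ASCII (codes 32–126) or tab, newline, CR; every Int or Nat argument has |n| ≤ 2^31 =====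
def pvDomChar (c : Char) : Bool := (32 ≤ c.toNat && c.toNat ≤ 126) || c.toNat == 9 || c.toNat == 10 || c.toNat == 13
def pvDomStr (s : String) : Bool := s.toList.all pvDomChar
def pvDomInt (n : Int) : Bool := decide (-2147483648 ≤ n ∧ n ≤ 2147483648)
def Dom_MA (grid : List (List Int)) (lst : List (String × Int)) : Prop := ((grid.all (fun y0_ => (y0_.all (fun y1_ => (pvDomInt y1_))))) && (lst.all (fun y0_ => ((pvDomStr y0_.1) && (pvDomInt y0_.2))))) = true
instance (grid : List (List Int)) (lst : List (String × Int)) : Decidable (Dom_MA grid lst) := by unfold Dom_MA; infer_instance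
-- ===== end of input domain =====

-- B replaces A's nested O(M*N) cell scan with the closed form R*(N-C)+(M-R)*C
-- computed from the row/column flip parities (asymptotically faster; same flip pass).

-- Shared flip pass: both Pythons run the identical toggle loop over lst.
def flipStep (st : List Int × List Int) (p : String × Int) : List Int × List Int :=
  if p.1 == "R" then
    (PySem.List.pySetD st.1 (p.2 - 1) (PySem.Int.bxor (PySem.List.pyGetD st.1 (p.2 - 1) 0) 1), st.2)
  else if p.1 == "C" then
    (st.1, PySem.List.pySetD st.2 (p.2 - 1) (PySem.Int.bxor (PySem.List.pyGetD st.2 (p.2 - 1) 0) 1))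
  else st

-- ===== PORT A =====
def MA (grid : List (List Int)) (lst : List (String × Int)) : Int :=
  let row0 : List Int := List.replicate grid.length 0
  let col0 : List Int := List.replicate (PySem.List.pyGetD grid 0 []).length 0
  let fl := lst.foldl flipStep (row0, col0)
  (PySem.List.pyRange 0 (grid.length : Int) 1).foldl (fun ans i =>
    (PySem.List.pyRange 0 ((PySem.List.pyGetD grid 0 []).length : Int) 1).foldl (fun ans j =>
      if PySem.Int.bxor (PySem.List.pyGetD fl.1 i 0) (PySem.List.pyGetD fl.2 j 0) == 1 then ans + 1 else ans) ans) 0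

-- ===== PORT B =====
def MA_alt (grid : List (List Int)) (lst : List (String × Int)) : Int :=
  let m : Int := grid.length
  let n : Int := (PySem.List.pyGetD grid 0 []).length
  let fl := lst.foldl flipStep (List.replicate grid.length 0, List.replicate (PySem.List.pyGetD grid 0 []).length 0)
  let R := fl.1.sum
  let C := fl.2.sum
  R * (n - C) + (m - R) * C

-- ===== PRECONDITION & SPEC =====
-- Pre_ excludes exactly the inputs on which A raises: grid == [] (IndexError on grid[0])
-- and flip targets whose index n-1 is out of Python range for the corresponding flip list.
def Pre_MA (grid : List (List Int)) (lst : List (String × Int)) : Prop :=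
  grid ≠ [] ∧ ∀ p ∈ lst,
    (p.1 = "R" → PySem.Raise.InRange grid.length (p.2 - 1)) ∧
    (p.1 = "C" → PySem.Raise.InRange (grid.headD []).length (p.2 - 1))
instance (grid : List (List Int)) (lst : List (String × Int)) : Decidable (Pre_MA grid lst) := by
  unfold Pre_MA; infer_instance

def pvWitness_MA : List (List Int) × (List (String × Int)) :=
  ([[1, 0], [0, 1]], [("R", 1), ("C", 2), ("R", 1), ("C", 0)])

def Spec_MA (grid : List (List Int)) (lst : List (String × Int)) (out : Int) : Prop := out = MA_alt grid lst
instance (grid : List (List Int)) (lst : List (String × Int)) (out : Int) : Decidable (Spec_MA grid lst out) := by unfold Spec_MA; infer_instance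

-- ===== CLAIM (what is proved, stated in full; the proofs are below) =====
def Claim_equal_MA : Prop := ∀ (grid : List (List Int)) (lst : List (String × Int)), Dom_MA grid lst → Pre_MA grid lst → Spec_MA grid lst (MA grid lst)

-- ===== LEMMAS AND PROOFS =====

def Bit (x : Int) : Prop := x = 0 ∨ x = 1

lemma bit_bxor_one {x : Int} (h : Bit x) : Bit (PySem.Int.bxor x 1) := by
  rcases h with h | h <;> subst h <;> [exact Or.inr (by decide); exact Or.inl (by decide)]

lemma bit_pyGetD {xs : List Int} (i : Int) (h : ∀ x ∈ xs, Bit x) :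
    Bit (PySem.List.pyGetD xs i 0) := by
  rcases hg : PySem.List.pyGet? xs i with _ | y
  · rw [PySem.List.pyGetD_of_none _ _ _ hg]; exact Or.inl rfl
  · have he : PySem.List.pyGetD xs i 0 = y := by simp [PySem.List.pyGetD, hg]
    rw [he]; exact h y (PySem.List.mem_of_pyGet?_eq_some xs hg)

lemma bit_pySetD {xs : List Int} {i v : Int} (hxs : ∀ x ∈ xs, Bit x) (hv : Bit v) :
    ∀ x ∈ PySem.List.pySetD xs i v, Bit x := by
  intro x hx
  unfold PySem.List.pySetD PySem.List.pySet? at hx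
  rcases hidx : PySem.List.pyIdx? xs.length i with _ | k
  · simp [hidx] at hx; exact hxs x hx
  · simp [hidx] at hx
    rcases List.mem_or_eq_of_mem_set hx with h | h
    · exact hxs x h
    · exact h ▸ hv

lemma flip_invariant (lst : List (String × Int)) (st : List Int × List Int)
    (h1 : ∀ x ∈ st.1, Bit x) (h2 : ∀ x ∈ st.2, Bit x) :
    let fl := lst.foldl flipStep st
    (∀ x ∈ fl.1, Bit x) ∧ (∀ x ∈ fl.2, Bit x) ∧
      fl.1.length = st.1.length ∧ fl.2.length = st.2.length := by
  induction lst generalizing st with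
  | nil => exact ⟨h1, h2, rfl, rfl⟩
  | cons p rest ih =>
    simp only [List.foldl_cons]
    have hstep1 : ∀ x ∈ (flipStep st p).1, Bit x := by
      unfold flipStep; split_ifs
      · exact bit_pySetD h1 (bit_bxor_one (bit_pyGetD _ h1))
      · exact h1
      · exact h1
    have hstep2 : ∀ x ∈ (flipStep st p).2, Bit x := by
      unfold flipStep; split_ifs
      · exact h2
      · exact bit_pySetD h2 (bit_bxor_one (bit_pyGetD _ h2))
      · exact h2
    have hlen1 : (flipStep st p).1.length = st.1.length := by
      unfold flipStep; split_ifs <;> first | rfl | simp [PySem.List.length_pySetD]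
    have hlen2 : (flipStep st p).2.length = st.2.length := by
      unfold flipStep; split_ifs <;> first | rfl | simp [PySem.List.length_pySetD]
    obtain ⟨a, b, c, d⟩ := ih (flipStep st p) hstep1 hstep2
    exact ⟨a, b, c.trans hlen1, d.trans hlen2⟩

lemma inner_count (b : List Int) (x : Int) (hx : Bit x) (hb : ∀ y ∈ b, Bit y) (z : Int) :
    b.foldl (fun ans y => if PySem.Int.bxor x y == 1 then ans + 1 else ans) z
      = z + (if x = 1 then (b.length : Int) - b.sum else b.sum) := by
  induction b generalizing z with
  | nil => simp
  | cons y rest ih =>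
    have hy := hb y (List.mem_cons_self ..)
    have hrest : ∀ y ∈ rest, Bit y := fun y hy => hb y (List.mem_cons_of_mem _ hy)
    simp only [List.foldl_cons, List.sum_cons, List.length_cons]
    rw [ih hrest]
    rcases hx with hx | hx <;> rcases hy with hy | hy <;> subst hx hy <;>
      simp only [show PySem.Int.bxor (0:Int) 0 = 0 from by decide,
        show PySem.Int.bxor (0:Int) 1 = 1 from by decide,
        show PySem.Int.bxor (1:Int) 0 = 1 from by decide,
        show PySem.Int.bxor (1:Int) 1 = 0 from by decide] <;>
      simp <;> omega

lemma outer_count (a b : List Int) (ha : ∀ x ∈ a, Bit x) (hb : ∀ y ∈ b, Bit y) (z : Int) :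
    a.foldl (fun ans x =>
        b.foldl (fun ans y => if PySem.Int.bxor x y == 1 then ans + 1 else ans) ans) z
      = z + a.sum * ((b.length : Int) - b.sum) + ((a.length : Int) - a.sum) * b.sum := by
  induction a generalizing z with
  | nil => simp
  | cons x rest ih =>
    have hx := ha x (List.mem_cons_self ..)
    have hrest : ∀ x ∈ rest, Bit x := fun x h => ha x (List.mem_cons_of_mem _ h)
    simp only [List.foldl_cons, List.sum_cons, List.length_cons]
    rw [inner_count b x hx hb z, ih hrest]
    rcases hx with hx | hx <;> subst hx <;> push_cast <;> ring

-- ===== VERDICT (by name: the statement is the Claim_ definition above) =====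
theorem MA_spec : Claim_equal_MA := by
  intro grid lst _ _
  unfold Spec_MA MA MA_alt
  simp only
  have hbit0 : ∀ (n : Nat), ∀ x ∈ (List.replicate n (0 : Int)), Bit x := by
    intro n x hx; rw [List.eq_of_mem_replicate hx]; exact Or.inl rfl
  set fl := lst.foldl flipStep
      (List.replicate grid.length 0, List.replicate (PySem.List.pyGetD grid 0 []).length 0) with hfl
  obtain ⟨hb1, hb2, hl1, hl2⟩ := flip_invariant lst
      (List.replicate grid.length 0, List.replicate (PySem.List.pyGetD grid 0 []).length 0)
      (hbit0 _) (hbit0 _)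
  rw [← hfl] at hl1 hl2
  have hl1' : fl.1.length = grid.length := by simpa using hl1
  have hl2' : fl.2.length = (PySem.List.pyGetD grid 0 []).length := by simpa using hl2
  rw [← hfl] at hb1 hb2
  clear_value fl
  rw [← hl1', ← hl2']
  have step1 : (PySem.List.pyRange 0 (fl.1.length : Int) 1).foldl (fun ans i =>
      (PySem.List.pyRange 0 (fl.2.length : Int) 1).foldl (fun ans j =>
        if PySem.Int.bxor (PySem.List.pyGetD fl.1 i 0) (PySem.List.pyGetD fl.2 j 0) == 1 then ans + 1 else ans) ans) (0 : Int)
      = fl.1.foldl (fun ans x =>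
          fl.2.foldl (fun ans y => if PySem.Int.bxor x y == 1 then ans + 1 else ans) ans) (0 : Int) := by
    have h1 := PySem.List.foldl_pyRange_zero_pyGetD' fl.1 0
      (fun (ans : Int) x => (PySem.List.pyRange 0 (fl.2.length : Int) 1).foldl (fun ans j =>
        if PySem.Int.bxor x (PySem.List.pyGetD fl.2 j 0) == 1 then ans + 1 else ans) ans) (0 : Int)
    rw [h1]
    apply PySem.List.foldl_congr_mem
    intro ans x _
    exact PySem.List.foldl_pyRange_zero_pyGetD' fl.2 0
      (fun ans y => if PySem.Int.bxor x y == 1 then ans + 1 else ans) ans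
  refine step1.trans ((outer_count fl.1 fl.2 hb1 hb2 0).trans ?_)
  ring
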